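-- pv_equiv track=rewrite | github.com/tensorflow/mesh | mesh_tensorflow/auto_mtf/api.py | _mesh_shape_iterator
-- ===== SOURCE A (Python) =====
-- def _mesh_shape_iterator(num_machines, max_mesh_shape_dimensions=None):
--   """Iterable of mesh shapes that use a certain number of machines.
--
--   Args:
--     num_machines: integer, a power of two, the number of machines available.
--     max_mesh_shape_dimensions: optional integer, the maximum number of
--         dimensions to consider in any layout.
--
--   Yields:
--     [int], the dimension sizes of a mesh shape.
--   """
--   if num_machines == 1:
--     yield [1]
--     return
--
--   current_product = num_machines
--   mesh_shape = [num_machines]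
--   while True:
--     if (max_mesh_shape_dimensions is None
--         or len(mesh_shape) <= max_mesh_shape_dimensions):
--       yield list(mesh_shape)
--     while mesh_shape[-1] == 2:
--       current_product //= mesh_shape.pop()
--       if not mesh_shape:
--         return
--     mesh_shape[-1] //= 2
--     current_product //= 2
--     while current_product < num_machines:
--       mesh_shape.append(min(mesh_shape[-1], num_machines // current_product))
--       current_product *= mesh_shape[-1]
-- ===== SOURCE B (Python) =====
-- # Recursive generation over descending power-of-two factorizations, largest factor first,
-- # instead of A's iterative in-place stepper.
--
-- def _gen(remaining, max_factor):
--   """All descending factorizations of power-of-two `remaining` with factors <= max_factor,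
--   in decreasing reverse-lexicographic order (largest first factor first)."""
--   if remaining == 1:
--     return [[]]
--   shapes = []
--   f = min(remaining, max_factor)
--   while f >= 2:
--     for tail in _gen(remaining // f, f):
--       shapes.append([f] + tail)
--     f //= 2
--   return shapes
--
--
-- def _mesh_shape_iterator(num_machines, max_mesh_shape_dimensions=None):
--   if num_machines == 1:
--     yield [1]
--     return
--   for shape in _gen(num_machines, num_machines):
--     if (max_mesh_shape_dimensions is None
--         or len(shape) <= max_mesh_shape_dimensions):
--       yield shape
-- ===== Notes on version B (the rewrite author's own statement) =====
-- stated objective: alternative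
-- what changed: Replaces A's iterative in-place stepper (mutating one shape list via pop/decrement/greedy-refill) with a recursive generator gen(remaining, max_factor) that builds descending power-of-two factorizations largest-factor-first, then filters by the dimension cap.
import Mathlib
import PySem

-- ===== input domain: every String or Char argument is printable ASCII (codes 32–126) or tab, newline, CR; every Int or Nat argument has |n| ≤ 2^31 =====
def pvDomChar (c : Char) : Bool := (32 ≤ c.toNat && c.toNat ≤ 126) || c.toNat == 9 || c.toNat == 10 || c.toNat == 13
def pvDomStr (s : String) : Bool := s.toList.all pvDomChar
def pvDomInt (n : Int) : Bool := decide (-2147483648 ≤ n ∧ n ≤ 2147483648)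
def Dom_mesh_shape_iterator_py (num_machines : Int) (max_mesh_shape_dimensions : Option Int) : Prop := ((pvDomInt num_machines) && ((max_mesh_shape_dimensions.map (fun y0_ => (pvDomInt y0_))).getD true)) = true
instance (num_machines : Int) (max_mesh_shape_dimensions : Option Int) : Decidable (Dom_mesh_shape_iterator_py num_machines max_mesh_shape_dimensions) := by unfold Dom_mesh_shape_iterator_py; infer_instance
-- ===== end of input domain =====

-- B replaces A's iterative in-place stepper over one mutable shape list by recursive
-- generation over descending factorizations (objective: alternative algorithm, similar cost).

-- the yield guard both sources use: max_mesh_shape_dimensions is None or len(shape) <= it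
def pvLenOK (mmsd : Option Int) (sh : List Int) : Bool :=
  match mmsd with
  | none => true
  | some m => decide ((sh.length : Int) ≤ m)

-- ===== PORT A =====
-- inner `while mesh_shape[-1] == 2: current_product //= mesh_shape.pop(); if not mesh_shape: return`
-- (fuel-bounded; fuel 100 exceeds the shape length, which is at most 31 on the admitted domain)
def pvAPop : Nat → Int → List Int → Option (Int × List Int)
  | 0, _, _ => none
  | fuel+1, cp, sh =>
    if sh.getLast? = some 2 then
      let popped := sh.getLastD 0
      let cp' := PySem.Int.floordiv cp popped
      let sh' := sh.dropLast
      if sh' = [] then none else pvAPop fuel cp' sh'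
    else some (cp, sh)

-- refill `while current_product < num_machines: append min(last, n // cp); cp *= appended`
def pvAFill : Nat → Int → Int → List Int → Int × List Int
  | 0, cp, _, sh => (cp, sh)
  | fuel+1, cp, n, sh =>
    if cp < n then
      let x := min (sh.getLastD 0) (PySem.Int.floordiv n cp)
      pvAFill fuel (cp * x) n (sh ++ [x])
    else (cp, sh)

-- the outer `while True` loop; acc collects the yields
-- (outer fuel num_machines.toNat + 1 exceeds the iteration count, which is the number of
-- descending factorizations of num_machines, at most num_machines)
def pvALoop : Nat → Int → Option Int → Int → List Int → List (List Int) → List (List Int)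
  | 0, _, _, _, _, acc => acc
  | fuel+1, n, mmsd, cp, sh, acc =>
    let acc' := if pvLenOK mmsd sh then acc ++ [sh] else acc
    match pvAPop 100 cp sh with
    | none => acc'
    | some (cp', sh') =>
      let lastv := sh'.getLastD 0
      let sh'' := sh'.dropLast ++ [PySem.Int.floordiv lastv 2]
      let cp'' := PySem.Int.floordiv cp' 2
      let st := pvAFill 100 cp'' n sh''
      pvALoop fuel n mmsd st.1 st.2 acc'

def mesh_shape_iterator_py (num_machines : Int) (max_mesh_shape_dimensions : Option Int) : List (List Int) :=
  if num_machines = 1 then [[1]]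
  else pvALoop (num_machines.toNat + 1) num_machines max_mesh_shape_dimensions num_machines [num_machines] []

-- ===== PORT B =====
-- _gen(remaining, max_factor): recursion on remaining; the `while f >= 2: ... f //= 2` loop
-- is pvGenAux. The mutual recursion is fuel-bounded (4096 exceeds any need on the domain).
mutual
def pvGen : Nat → Int → Int → List (List Int)
  | 0, _, _ => []
  | fuel+1, remaining, max_factor =>
    if remaining = 1 then [[]]
    else pvGenAux fuel remaining (min remaining max_factor)
def pvGenAux : Nat → Int → Int → List (List Int)
  | 0, _, _ => []
  | fuel+1, remaining, f =>
    if 2 ≤ f then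
      ((pvGen fuel (PySem.Int.floordiv remaining f) f).map (fun tail => f :: tail))
        ++ pvGenAux fuel remaining (PySem.Int.floordiv f 2)
    else []
end

def mesh_shape_iterator_py_alt (num_machines : Int) (max_mesh_shape_dimensions : Option Int) : List (List Int) :=
  if num_machines = 1 then [[1]]
  else (pvGen 4096 num_machines num_machines).filter (pvLenOK max_mesh_shape_dimensions)

-- ===== PRECONDITION & SPEC =====
-- Pre_ excludes exactly the inputs on which A never returns: the Python generator loops
-- forever whenever num_machines is not a positive power of two (it never raises there).
def Pre_mesh_shape_iterator_py (num_machines : Int) (max_mesh_shape_dimensions : Option Int) : Prop :=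
  1 ≤ num_machines ∧ 2 ^ (num_machines.toNat.log2) = num_machines.toNat
instance (num_machines : Int) (max_mesh_shape_dimensions : Option Int) : Decidable (Pre_mesh_shape_iterator_py num_machines max_mesh_shape_dimensions) := by unfold Pre_mesh_shape_iterator_py; infer_instance

def pvWitness_mesh_shape_iterator_py : Int × Option Int := (8, some 2)

def Spec_mesh_shape_iterator_py (num_machines : Int) (max_mesh_shape_dimensions : Option Int) (out : List (List Int)) : Prop := out = mesh_shape_iterator_py_alt num_machines max_mesh_shape_dimensions
instance (num_machines : Int) (max_mesh_shape_dimensions : Option Int) (out : List (List Int)) : Decidable (Spec_mesh_shape_iterator_py num_machines max_mesh_shape_dimensions out) := by unfold Spec_mesh_shape_iterator_py; infer_instance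

-- ===== CLAIM (what is proved, stated in full; the proofs are below) =====
def Claim_equal_mesh_shape_iterator_py : Prop := ∀ (num_machines : Int) (max_mesh_shape_dimensions : Option Int), Dom_mesh_shape_iterator_py num_machines max_mesh_shape_dimensions → Pre_mesh_shape_iterator_py num_machines max_mesh_shape_dimensions → Spec_mesh_shape_iterator_py num_machines max_mesh_shape_dimensions (mesh_shape_iterator_py num_machines max_mesh_shape_dimensions)

-- ===== LEMMAS AND PROOFS =====

-- (2^a : Int), the only values the algorithm touches on its domain
def p2 (a : Nat) : Int := ((2^a : Nat) : Int)

theorem p2_le_p2 {a b : Nat} (h : a ≤ b) : p2 a ≤ p2 b := by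
  unfold p2; exact_mod_cast Nat.pow_le_pow_right (by norm_num) h

theorem p2_lt_p2 {a b : Nat} (h : a < b) : p2 a < p2 b := by
  unfold p2; exact_mod_cast Nat.pow_lt_pow_right (by norm_num) h

theorem p2_inj {a b : Nat} (h : p2 a = p2 b) : a = b := by
  unfold p2 at h
  have h' : (2:Nat)^a = 2^b := by exact_mod_cast h
  exact Nat.pow_right_injective (by norm_num) h' 

theorem p2_zero : p2 0 = 1 := by unfold p2; norm_num

theorem p2_one : p2 1 = 2 := by unfold p2; norm_num

theorem p2_eq_one_iff {a : Nat} : p2 a = 1 ↔ a = 0 := by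
  constructor
  · intro h; exact p2_inj (by rw [h, p2_zero])
  · intro h; rw [h, p2_zero]

theorem p2_eq_two_iff {a : Nat} : p2 a = 2 ↔ a = 1 := by
  constructor
  · intro h; exact p2_inj (by rw [h, p2_one])
  · intro h; rw [h, p2_one]

theorem two_le_p2 {a : Nat} (h : 1 ≤ a) : 2 ≤ p2 a := by
  calc (2:Int) = p2 1 := p2_one.symm
  _ ≤ p2 a := p2_le_p2 h

theorem min_p2 (a b : Nat) : min (p2 a) (p2 b) = p2 (min a b) := by
  rcases Nat.le_total a b with h | h
  · rw [min_eq_left (p2_le_p2 h), Nat.min_eq_left h]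
  · rw [min_eq_right (p2_le_p2 h), Nat.min_eq_right h]

theorem p2_mul (a b : Nat) : p2 a * p2 b = p2 (a + b) := by
  unfold p2; push_cast; rw [pow_add]

theorem floordiv_p2 {a b : Nat} (h : b ≤ a) : PySem.Int.floordiv (p2 a) (p2 b) = p2 (a - b) := by
  unfold p2
  rw [PySem.Int.floordiv_natCast, Nat.pow_div h (by norm_num)]

theorem floordiv_p2_two {a : Nat} (h : 1 ≤ a) : PySem.Int.floordiv (p2 a) 2 = p2 (a - 1) := by
  have : (2 : Int) = p2 1 := p2_one.symm
  rw [this, floordiv_p2 h]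

-- division strictly shrinks a positive dividend (used for termination below)
theorem floordiv_toNat_lt {r f : Int} (hr : 2 ≤ r) (hf : 2 ≤ f) :
    (PySem.Int.floordiv r f).toNat < r.toNat := by
  rw [PySem.Int.floordiv_eq_ediv_of_pos (by omega)]
  have h1 : r = ((r.toNat : Nat) : Int) := by omega
  have h2 : f = ((f.toNat : Nat) : Int) := by omega
  rw [h1, h2, ← Int.natCast_div, Int.toNat_natCast]
  exact Nat.div_lt_self (by omega) (by omega)

-- proof-side greedy suffix: the factors A's refill loop appends (cap c, remaining r)
def gr (r c : Int) : List Int :=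
  if h : 1 < r ∧ 2 ≤ c then
    have : (PySem.Int.floordiv r (min c r)).toNat < r.toNat :=
      floordiv_toNat_lt (by omega) (by omega)
    (min c r) :: gr (PySem.Int.floordiv r (min c r)) (min c r)
  else []
termination_by r.toNat

-- proof-side recursion-structured generator (genD = B's _gen, genAuxD = its factor loop)
mutual
def genD (r c : Int) : List (List Int) :=
  if r = 1 then [[]]
  else genAuxD r (min r c)
termination_by (r.toNat, 1, 0)
def genAuxD (r f : Int) : List (List Int) :=
  if h : 2 ≤ f ∧ 2 ≤ r then
    have : (PySem.Int.floordiv r f).toNat < r.toNat := floordiv_toNat_lt h.2 h.1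
    have : (PySem.Int.floordiv f 2).toNat < f.toNat := floordiv_toNat_lt h.1 (by omega)
    ((genD (PySem.Int.floordiv r f) f).map (fun tl => f :: tl)) ++ genAuxD r (PySem.Int.floordiv f 2)
  else []
termination_by (r.toNat, 0, f.toNat)
end

-- what the loop produces after all states extending prefix t are exhausted
def rest (n : Int) (t : List Int) : List (List Int) :=
  match hs : t.reverse.dropWhile (fun x => x == 2) with
  | [] => []
  | g :: u' =>
    ((genD (PySem.Int.floordiv n u'.reverse.prod) (PySem.Int.floordiv g 2)).map
        (fun z => u'.reverse ++ z))
      ++ rest n u'.reverse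
termination_by t.length
decreasing_by
  have h1 : (t.reverse.dropWhile (fun x => x == 2)).length ≤ t.reverse.length :=
    List.length_dropWhile_le _ _
  rw [hs] at h1
  simp only [List.length_reverse, List.length_cons] at *
  omega

-- A's loop, with the per-yield filter stripped out (each iteration emits its state)
def pvAll : Nat → Int → Int → List Int → List (List Int)
  | 0, _, _, _ => []
  | fuel+1, n, cp, sh =>
    sh ::
    (match pvAPop 100 cp sh with
     | none => []
     | some (cp', sh') =>
       let lastv := sh'.getLastD 0
       let sh'' := sh'.dropLast ++ [PySem.Int.floordiv lastv 2]
       let cp'' := PySem.Int.floordiv cp' 2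
       let st := pvAFill 100 cp'' n sh''
       pvAll fuel n st.1 st.2)

-- the inline yield guard commutes with the loop: A's loop is the filter of the unfiltered run
theorem pvALoop_eq_filter (fuel : Nat) (n : Int) (mmsd : Option Int) :
    ∀ (cp : Int) (sh : List Int) (acc : List (List Int)),
    pvALoop fuel n mmsd cp sh acc = acc ++ (pvAll fuel n cp sh).filter (pvLenOK mmsd) := by
  induction fuel with
  | zero => intro cp sh acc; simp [pvALoop, pvAll]
  | succ f ih =>
    intro cp sh acc
    simp only [pvALoop, pvAll]
    cases hp : pvAPop 100 cp sh with
    | none => simp [List.filter]; cases h : pvLenOK mmsd sh <;> simp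
    | some p =>
      simp only [ih]
      cases h : pvLenOK mmsd sh <;> simp [h, List.filter]

theorem prod_map_p2 (es : List Nat) : (es.map p2).prod = p2 es.sum := by
  induction es with
  | nil => simp [p2_zero]
  | cons e es ih => simp [ih, p2_mul]

-- unfolding equations for gr / genD / genAuxD
theorem gr_nil {r c : Int} (h : ¬(1 < r ∧ 2 ≤ c)) : gr r c = [] := by
  rw [gr.eq_def, dif_neg h]

theorem gr_cons {r c : Int} (h1 : 1 < r) (h2 : 2 ≤ c) :
    gr r c = min c r :: gr (PySem.Int.floordiv r (min c r)) (min c r) := by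
  rw [gr.eq_def]
  split
  · rfl
  · next hcon => exact absurd ⟨h1, h2⟩ hcon

theorem genD_one (c : Int) : genD 1 c = [[]] := by
  rw [genD.eq_def]; simp

theorem genD_ne_one {r c : Int} (h : r ≠ 1) : genD r c = genAuxD r (min r c) := by
  rw [genD.eq_def, if_neg h]

theorem genAuxD_nil {r f : Int} (h : ¬(2 ≤ f ∧ 2 ≤ r)) : genAuxD r f = [] := by
  rw [genAuxD.eq_def, dif_neg h]

theorem genAuxD_cons {r f : Int} (h1 : 2 ≤ f) (h2 : 2 ≤ r) :
    genAuxD r f = ((genD (PySem.Int.floordiv r f) f).map (fun tl => f :: tl))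
      ++ genAuxD r (PySem.Int.floordiv f 2) := by
  rw [genAuxD.eq_def]
  split
  · rfl
  · next hcon => exact absurd ⟨h1, h2⟩ hcon

theorem gr_zero (c : Int) : gr (p2 0) c = [] := by
  apply gr_nil; rw [p2_zero]; omega

theorem gr_unfold {a b : Nat} (ha : 1 ≤ a) (hb : 1 ≤ b) :
    gr (p2 a) (p2 b) = p2 (min a b) :: gr (p2 (a - min a b)) (p2 (min a b)) := by
  have h1 : 1 < p2 a := by have := two_le_p2 ha; omega
  have h2 : 2 ≤ p2 b := two_le_p2 hb
  rw [gr_cons h1 h2, min_p2, Nat.min_comm b a, floordiv_p2 (Nat.min_le_left a b)]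

theorem genAuxD_one (r : Int) : genAuxD r 1 = [] := by
  apply genAuxD_nil; omega

theorem genD_unfold {a b : Nat} (ha : 1 ≤ a) (hb : 1 ≤ b) :
    genD (p2 a) (p2 b) =
      ((genD (p2 (a - min a b)) (p2 (min a b))).map (fun z => p2 (min a b) :: z))
        ++ (if 2 ≤ min a b then genD (p2 a) (p2 (min a b - 1)) else []) := by
  have hne : p2 a ≠ 1 := by
    intro hc; have := p2_eq_one_iff.mp hc; omega
  have h2a : 2 ≤ p2 a := two_le_p2 ha
  have hmb : 1 ≤ min a b := by omega
  have h2m : 2 ≤ p2 (min a b) := two_le_p2 hmb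
  rw [genD_ne_one hne, min_p2, genAuxD_cons h2m h2a,
      floordiv_p2 (Nat.min_le_left a b), floordiv_p2_two hmb]
  congr 1
  by_cases h : 2 ≤ min a b
  · rw [if_pos h]
    have hm1 : 1 ≤ min a b - 1 := by omega
    have : genD (p2 a) (p2 (min a b - 1)) = genAuxD (p2 a) (min (p2 a) (p2 (min a b - 1))) :=
      genD_ne_one hne
    rw [this, min_p2]
    have : min a (min a b - 1) = min a b - 1 := by omega
    rw [this]
  · rw [if_neg h]
    have : min a b = 1 := by omega
    rw [this, p2_zero, genAuxD_one]

-- length bound: genD over 2^a yields at most 2^a shapes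
theorem length_genD_aux (a : Nat) :
    ∀ (b : Nat), (genD (p2 a) (p2 b)).length ≤ 2^a := by
  induction a using Nat.strong_induction_on with
  | _ a iha =>
    have aux : ∀ b, 1 ≤ b → b ≤ a → (genAuxD (p2 a) (p2 b)).length ≤ 2^a - 2^(a-b) := by
      intro b
      induction b with
      | zero => omega
      | succ b ihb =>
        intro _ hba
        have h2a : 2 ≤ p2 a := two_le_p2 (by omega)
        have h2b : 2 ≤ p2 (b+1) := two_le_p2 (by omega)
        rw [genAuxD_cons h2b h2a, floordiv_p2 (by omega), floordiv_p2_two (by omega)]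
        rw [List.length_append, List.length_map]
        have hgen := iha (a - (b+1)) (by omega) (b+1)
        have hpow : (2:Nat)^(a-b) = 2^(a-(b+1)) * 2 := by
          rw [← Nat.pow_succ]; congr 1; omega
        have hple : (2:Nat)^(a-b) ≤ 2^a := Nat.pow_le_pow_right (by norm_num) (by omega)
        by_cases hb1 : 1 ≤ b
        · have haux := ihb (by omega) (by omega)
          have : (b + 1 - 1) = b := by omega
          rw [this] at *
          have hple2 : (2:Nat)^(a-b) ≤ 2^a := hple
          omega
        · have hb0 : b = 0 := by omega
          subst hb0
          simp only [Nat.add_sub_cancel, p2_zero, genAuxD_one, List.length_nil]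
          omega
    intro b
    by_cases ha0 : a = 0
    · subst ha0; rw [p2_zero, genD_one]; simp
    · have hne : p2 a ≠ 1 := by intro hc; have := p2_eq_one_iff.mp hc; omega
      rw [genD_ne_one hne, min_p2]
      by_cases hb0 : b = 0
      · subst hb0
        rw [Nat.min_eq_right (by omega), p2_zero, genAuxD_one]
        simp
      · exact le_trans (aux (min a b) (by omega) (by omega)) (Nat.sub_le _ _)

theorem length_genD_le (a : Nat) : ∀ (b : Nat), (genD (p2 a) (p2 b)).length ≤ 2^a :=
  length_genD_aux a

-- fuel sufficiency for the B port
theorem pvGenAux_one (fuel : Nat) (r : Int) : pvGenAux fuel r 1 = [] := by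
  cases fuel <;> simp [pvGenAux]

theorem genFuel : ∀ fuel : Nat,
    (∀ a b : Nat, a ≤ 31 → 34*a+3 ≤ fuel → pvGen fuel (p2 a) (p2 b) = genD (p2 a) (p2 b)) ∧
    (∀ a b : Nat, 1 ≤ a → a ≤ 31 → 1 ≤ b → b ≤ a → 33*a+b+2 ≤ fuel →
      pvGenAux fuel (p2 a) (p2 b) = genAuxD (p2 a) (p2 b)) := by
  intro fuel
  induction fuel using Nat.strong_induction_on with
  | _ fuel ih =>
    constructor
    · intro a b ha hf
      obtain ⟨f, rfl⟩ : ∃ f, fuel = f + 1 := ⟨fuel - 1, by omega⟩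
      by_cases ha0 : a = 0
      · subst ha0; rw [p2_zero]; simp [pvGen, genD_one]
      · have hne : p2 a ≠ 1 := by intro hc; have := p2_eq_one_iff.mp hc; omega
        rw [pvGen, if_neg hne, genD_ne_one hne, min_p2]
        by_cases hb0 : b = 0
        · rw [hb0, Nat.min_eq_right (by omega), p2_zero, pvGenAux_one, genAuxD_one]
        · exact (ih f (by omega)).2 a (min a b) (by omega) ha (by omega) (by omega) (by omega)
    · intro a b ha1 ha hb1 hba hf
      obtain ⟨f, rfl⟩ : ∃ f, fuel = f + 1 := ⟨fuel - 1, by omega⟩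
      have h2b : 2 ≤ p2 b := two_le_p2 hb1
      have h2a : 2 ≤ p2 a := two_le_p2 ha1
      rw [pvGenAux, if_pos h2b, genAuxD_cons h2b h2a,
          floordiv_p2 hba, floordiv_p2_two hb1]
      congr 1
      · congr 1
        exact (ih f (by omega)).1 (a - b) b (by omega) (by omega)
      · by_cases hb2 : 2 ≤ b
        · exact (ih f (by omega)).2 a (b-1) ha1 ha (by omega) (by omega) (by omega)
        · have : b = 1 := by omega
          subst this
          simp only [Nat.sub_self, p2_zero, pvGenAux_one, genAuxD_one]

theorem pvGen_eq_genD {a b : Nat} (ha : a ≤ 31) :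
    pvGen 4096 (p2 a) (p2 b) = genD (p2 a) (p2 b) :=
  (genFuel 4096).1 a b ha (by omega)

-- pop lemmas
theorem pop_none (j : Nat) : ∀ (fuel : Nat) (cp : Int), 1 ≤ j → j ≤ fuel →
    pvAPop fuel cp (List.replicate j 2) = none := by
  induction j with
  | zero => intro fuel cp h; omega
  | succ j ih =>
    intro fuel cp _ hf
    obtain ⟨f, rfl⟩ : ∃ f, fuel = f + 1 := ⟨fuel - 1, by omega⟩
    rw [List.replicate_succ']
    simp only [pvAPop, List.getLast?_concat, List.dropLast_concat, List.getLastD_concat,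
      if_true]
    split
    · rfl
    · next hne =>
        have hj : j ≠ 0 := by simpa using hne
        exact ih f _ (by omega) (by omega)

theorem pop_some (j : Nat) : ∀ (fuel v : Nat) (u : List Int) (g : Int), g ≠ 2 → j < fuel → j ≤ v →
    pvAPop fuel (p2 v) (u ++ [g] ++ List.replicate j 2) = some (p2 (v - j), u ++ [g]) := by
  induction j with
  | zero =>
    intro fuel v u g hg hf _
    obtain ⟨f, rfl⟩ : ∃ f, fuel = f + 1 := ⟨fuel - 1, by omega⟩
    simp only [List.replicate_zero, List.append_nil, pvAPop, List.getLast?_concat]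
    rw [if_neg (by simpa using hg)]
    simp
  | succ j ih =>
    intro fuel v u g hg hf hv
    obtain ⟨f, rfl⟩ : ∃ f, fuel = f + 1 := ⟨fuel - 1, by omega⟩
    have hre : u ++ [g] ++ List.replicate (j+1) 2 = (u ++ [g] ++ List.replicate j 2) ++ [2] := by
      rw [List.replicate_succ', ← List.append_assoc]
    rw [hre]
    simp only [pvAPop, List.getLast?_concat, List.dropLast_concat, List.getLastD_concat,
      if_true]
    split
    · next hcon => exact absurd hcon (by simp)
    rw [floordiv_p2_two (by omega)]
    have hih := ih f (v-1) u g hg (by omega) (by omega)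
    rw [show v - 1 - j = v - (j + 1) from by omega] at hih
    exact hih

-- fill lemma: the refill loop appends exactly gr
theorem fill_eq_gr (a : Nat) : ∀ (fuel K d : Nat) (u : List Int), a ≤ K → 1 ≤ d → a ≤ fuel →
    pvAFill fuel (p2 (K - a)) (p2 K) (u ++ [p2 d]) = (p2 K, (u ++ [p2 d]) ++ gr (p2 a) (p2 d)) := by
  induction a using Nat.strong_induction_on with
  | _ a iha =>
    intro fuel K d u haK hd haf
    by_cases ha0 : a = 0
    · subst ha0
      rw [gr_zero, List.append_nil, Nat.sub_zero]
      cases fuel with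
      | zero => rfl
      | succ f => rw [pvAFill, if_neg (by omega)]
    · obtain ⟨f, rfl⟩ : ∃ f, fuel = f + 1 := ⟨fuel - 1, by omega⟩
      have hlt : p2 (K - a) < p2 K := p2_lt_p2 (by omega)
      rw [pvAFill, if_pos hlt]
      simp only [List.getLastD_concat]
      have hdiv : PySem.Int.floordiv (p2 K) (p2 (K - a)) = p2 a := by
        rw [floordiv_p2 (by omega)]; congr 1; omega
      rw [hdiv, min_p2]
      set md := min d a with hmd
      have hmd1 : 1 ≤ md := by omega
      have hcp : p2 (K - a) * p2 md = p2 (K - (a - md)) := by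
        rw [p2_mul]; congr 1; omega
      have hsh : (u ++ [p2 d]) ++ [p2 md] = (u ++ [p2 d]) ++ [p2 md] := rfl
      rw [hcp]
      have := iha (a - md) (by omega) f K md (u ++ [p2 d]) (by omega) hmd1 (by omega)
      rw [this]
      rw [gr_unfold (by omega : 1 ≤ a) hd]
      have hmm : min a d = md := by omega
      rw [hmm]
      simp [List.append_assoc]

-- dropWhile over a satisfied replicate prefix
theorem dropWhile_rep_append {α : Type} (p : α → Bool) (x : α) (hx : p x = true) :
    ∀ (j : Nat) (l : List α), List.dropWhile p (List.replicate j x ++ l) = List.dropWhile p l := by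
  intro j
  induction j with
  | zero => simp
  | succ j ih => intro l; simp [List.replicate_succ, List.dropWhile_cons, hx, ih]

-- unfolding equations for rest
theorem rest_nil {n : Int} {t : List Int}
    (h : t.reverse.dropWhile (fun x => x == 2) = []) : rest n t = [] := by
  rw [rest.eq_def]
  split
  · rfl
  · next g u' heq => rw [h] at heq; cases heq

theorem rest_cons {n : Int} {t : List Int} {g : Int} {u' : List Int}
    (h : t.reverse.dropWhile (fun x => x == 2) = g :: u') :
    rest n t = ((genD (PySem.Int.floordiv n u'.reverse.prod) (PySem.Int.floordiv g 2)).map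
        (fun z => u'.reverse ++ z)) ++ rest n u'.reverse := by
  rw [rest.eq_def]
  split
  · next heq => rw [h] at heq; cases heq
  · next g2 u2 heq =>
      rw [h] at heq
      injection heq with h1 h2
      subst h1; subst h2
      rfl

-- appending a 2 does not change rest
theorem rest_append_two (n : Int) (t : List Int) : rest n (t ++ [2]) = rest n t := by
  have hdw : (t ++ [2]).reverse.dropWhile (fun x => x == 2)
      = t.reverse.dropWhile (fun x => x == 2) := by
    rw [List.reverse_append]
    simp [List.dropWhile_cons]
  rcases hc : t.reverse.dropWhile (fun x => x == 2) with _ | ⟨g, u'⟩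
  · rw [rest_nil hc, rest_nil (hdw.trans hc)]
  · rw [rest_cons hc, rest_cons (hdw.trans hc)]

-- the main simulation lemma: A's unfiltered run from state t ++ gr r c is the
-- fuel-truncated enumeration (states with prefix t, then everything after t)
theorem ML : ∀ (fuel : Nat), ∀ (a K b : Nat) (es : List Nat) (t : List Int),
    1 ≤ K → K ≤ 31 → t = es.map p2 → (∀ e ∈ es, 1 ≤ e) → es.sum + a = K → 1 ≤ b →
    pvAll fuel (p2 K) (p2 K) (t ++ gr (p2 a) (p2 b)) =
      List.take fuel (((genD (p2 a) (p2 b)).map (fun z => t ++ z)) ++ rest (p2 K) t) := by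
  intro fuel
  induction fuel with
  | zero => intro a K b es t _ _ _ _ _ _; simp [pvAll]
  | succ fuel ihf =>
    intro a
    induction a using Nat.strong_induction_on with
    | _ a iha =>
      intro K b es t hK1 hK31 ht hes hsum hb1
      by_cases ha0 : a = 0
      · subst ha0
        rw [gr_zero, List.append_nil, p2_zero, genD_one]
        have hKsum : es.sum = K := by omega
        rcases hsplit : es.reverse.dropWhile (fun e => e == 1) with _ | ⟨e, v⟩
        · -- all exponents are 1: the shape is all 2s and the run ends after this state
          have hall : ∀ x ∈ es, x = 1 := by
            intro x hx
            have := List.dropWhile_eq_nil_iff.mp hsplit x (List.mem_reverse.mpr hx)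
            simpa using this
          have hesrep : es = List.replicate es.length 1 := List.eq_replicate_of_mem hall
          have hlen : es.length = K := by
            have : es.sum = es.length := by
              conv_lhs => rw [hesrep]
              simp
            omega
          have htrep : t = List.replicate K 2 := by
            rw [ht]
            conv_lhs => rw [hesrep]
            rw [List.map_replicate, p2_one, hlen]
          simp only [pvAll]
          rw [htrep, pop_none K 100 _ (by omega) (by omega)]
          rw [rest_nil (by rw [List.reverse_replicate, List.dropWhile_replicate]; simp)]
          simp
        · -- some exponent exceeds 1: pop the trailing 2s, halve, refill
          set j := (es.reverse.takeWhile (fun e => e == 1)).length with hjdef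
          have htk : ∀ x ∈ es.reverse.takeWhile (fun e => e == 1), x = 1 := by
            intro x hx
            simpa using List.mem_takeWhile_imp hx
          have hdec : es.reverse = List.replicate j 1 ++ e :: v := by
            conv_lhs => rw [← List.takeWhile_append_dropWhile (p := fun e => e == 1) (l := es.reverse)]
            rw [hsplit]
            congr 1
            exact List.eq_replicate_of_mem htk
          have hesdec : es = v.reverse ++ [e] ++ List.replicate j 1 := by
            have h0 := congrArg List.reverse hdec
            simpa [List.reverse_append, List.reverse_replicate] using h0
          have he1 : e ≠ 1 := by
            intro hcon
            have hstep : List.dropWhile (fun x => x == 1) (e :: v) = e :: v := by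
              calc List.dropWhile (fun x => x == 1) (e :: v)
                  = List.dropWhile (fun x => x == 1) (List.replicate j 1 ++ e :: v) :=
                    (dropWhile_rep_append _ _ (by simp) j _).symm
                _ = List.dropWhile (fun x => x == 1) es.reverse := by rw [hdec]
                _ = e :: v := hsplit
            rw [List.dropWhile_cons, if_pos (by simp [hcon])] at hstep
            have hlen := List.length_dropWhile_le (fun x => x == 1) v
            have hcg := congrArg List.length hstep
            simp at hcg
            omega
          have he2 : 2 ≤ e := by
            have hee : e ∈ es := by rw [hesdec]; simp
            have := hes e hee
            omega
          have hsum2 : v.sum + e + j = K := by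
            rw [hesdec] at hKsum
            simp [List.sum_append, List.sum_reverse] at hKsum
            omega
          set u := v.reverse.map p2 with hudef
          have htdec : t = u ++ [p2 e] ++ List.replicate j 2 := by
            rw [ht, hesdec]
            simp [List.map_append, List.map_replicate, p2_one, hudef]
          simp only [pvAll]
          rw [htdec, pop_some j 100 K u (p2 e) (by rw [Ne, p2_eq_two_iff]; omega) (by omega) (by omega)]
          dsimp only
          rw [List.getLastD_concat, List.dropLast_concat,
              floordiv_p2_two (by omega : 1 ≤ e), floordiv_p2_two (by omega : 1 ≤ K - j)]
          have hfill := fill_eq_gr (j+1) 100 K (e-1) u (by omega) (by omega) (by omega)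
          rw [show K - j - 1 = K - (j+1) from by omega, hfill]
          have hgr : (u ++ [p2 (e-1)]) ++ gr (p2 (j+1)) (p2 (e-1)) = u ++ gr (p2 (e+j)) (p2 (e-1)) := by
            rw [gr_unfold (by omega : 1 ≤ e+j) (by omega : 1 ≤ e-1),
                show min (e+j) (e-1) = e - 1 from by omega,
                show e + j - (e-1) = j + 1 from by omega]
            simp
          rw [hgr]
          have hIH := ihf (e+j) K (e-1) v.reverse u hK1 hK31 rfl
            (by intro x hx
                apply hes
                rw [hesdec]
                simp only [List.mem_append]
                left; left; exact hx)
            (by rw [List.sum_reverse]; omega) (by omega)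
          rw [hIH]
          have hdw : (u ++ [p2 e] ++ List.replicate j 2).reverse.dropWhile (fun x => x == 2)
              = p2 e :: u.reverse := by
            have h0 : (u ++ [p2 e] ++ List.replicate j 2).reverse
                = List.replicate j 2 ++ (p2 e :: u.reverse) := by simp
            rw [h0, dropWhile_rep_append _ _ (by simp) j _, List.dropWhile_cons,
              if_neg (by simp [p2_eq_two_iff]; omega)]
          rw [rest_cons hdw, List.reverse_reverse]
          have hprod : u.prod = p2 v.sum := by rw [hudef, prod_map_p2, List.sum_reverse]
          rw [hprod, floordiv_p2 (by omega : v.sum ≤ K), floordiv_p2_two (by omega : 1 ≤ e),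
              show K - v.sum = e + j from by omega]
          simp [List.take_succ_cons]
      · -- a ≥ 1: the state carries a strictly smaller remaining product after its head factor
        have ha1 : 1 ≤ a := by omega
        have hmb1 : 1 ≤ min a b := by omega
        have hmba : min a b ≤ a := by omega
        rw [gr_unfold ha1 hb1]
        rw [show t ++ (p2 (min a b) :: gr (p2 (a - min a b)) (p2 (min a b)))
              = (t ++ [p2 (min a b)]) ++ gr (p2 (a - min a b)) (p2 (min a b)) from by simp]
        have hIH := iha (a - min a b) (by omega) K (min a b) (es ++ [min a b]) (t ++ [p2 (min a b)])
          hK1 hK31 (by rw [ht]; simp)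
          (by intro x hx
              rcases List.mem_append.mp hx with h | h
              · exact hes x h
              · simp at h; omega)
          (by simp; omega) hmb1
        rw [hIH]
        congr 1
        rw [genD_unfold ha1 hb1, List.map_append, List.map_map]
        rw [show ((fun z => t ++ z) ∘ (fun z : List Int => p2 (min a b) :: z))
              = (fun z => (t ++ [p2 (min a b)]) ++ z) from by funext z; simp]
        rw [List.append_assoc]
        congr 1
        by_cases hmb2 : 2 ≤ min a b
        · rw [if_pos hmb2]
          have hdw : (t ++ [p2 (min a b)]).reverse.dropWhile (fun x => x == 2)
              = p2 (min a b) :: t.reverse := by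
            have h0 : (t ++ [p2 (min a b)]).reverse = p2 (min a b) :: t.reverse := by simp
            rw [h0, List.dropWhile_cons, if_neg (by simp [p2_eq_two_iff]; omega)]
          rw [rest_cons hdw, List.reverse_reverse]
          have hprod : t.prod = p2 es.sum := by rw [ht, prod_map_p2]
          rw [hprod, floordiv_p2 (by omega : es.sum ≤ K), floordiv_p2_two (by omega : 1 ≤ min a b),
              show K - es.sum = a from by omega]
        · rw [if_neg hmb2]
          have hmbe : min a b = 1 := by omega
          rw [hmbe, p2_one, rest_append_two]
          simp

-- ===== VERDICT (by name: the statement is the Claim_ definition above) =====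
theorem mesh_shape_iterator_py_spec : Claim_equal_mesh_shape_iterator_py := by
  intro n mmsd hdom hpre
  unfold Spec_mesh_shape_iterator_py
  obtain ⟨h1, h2⟩ := hpre
  unfold mesh_shape_iterator_py mesh_shape_iterator_py_alt
  by_cases hn1 : n = 1
  · simp [hn1]
  · simp only [hn1, if_false]
    set K := n.toNat.log2 with hk
    have hn : n = p2 K := by unfold p2; omega
    have hK1 : 1 ≤ K := by
      have : 2 ≤ n.toNat := by omega
      by_contra h
      push_neg at h
      interval_cases K <;> omega
    have hK31 : K ≤ 31 := by
      have hdom' : n ≤ 2147483648 := by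
        unfold Dom_mesh_shape_iterator_py pvDomInt at hdom
        simp at hdom; omega
      by_contra hge
      push_neg at hge
      have h32 : (2:Nat)^32 ≤ 2^K := Nat.pow_le_pow_right (by norm_num) hge
      have : (2:Nat)^K = n.toNat := h2
      omega
    have hstate : [n] = ([] : List Int) ++ gr (p2 K) (p2 K) := by
      rw [gr_unfold hK1 hK1]
      simp [Nat.min_self, Nat.sub_self, gr_zero, hn]
    have hrest : rest (p2 K) [] = [] := by rw [rest.eq_def]; simp
    have hml := ML (n.toNat + 1) K K K [] [] hK1 hK31 (by simp) (by simp) (by simp) hK1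
    rw [← hstate] at hml
    rw [hn] at hml
    rw [hn, pvALoop_eq_filter, hml, hrest]
    have ht : (p2 K).toNat = 2^K := by unfold p2; rw [Int.toNat_natCast]
    have hlen : ((genD (p2 K) (p2 K)).map (fun z => ([]:List Int) ++ z)).length ≤ (p2 K).toNat + 1 := by
      rw [List.length_map, ht]
      have := length_genD_le K K
      omega
    rw [List.append_nil, List.take_of_length_le hlen, pvGen_eq_genD hK31]
    simp
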